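-- pv_equiv track=rewrite | github.com/asmit404/GFG_Solutions | Maximum Intersecting Lines.py | maxIntersections
-- ===== SOURCE A (Python) =====
-- def maxIntersections(lines, N):
--     q = {}
--     for i in lines:
--         q[i[0]] = q.get(i[0], 0)+1
--         q[i[1]+1] = q.get(i[1]+1, 0)-1
--     ps = 0
--     mx = 1
--     for i in sorted(q):
--         ps += q[i]
--         mx = max(mx, ps)
--     return mx
-- ===== SOURCE B (Python) =====
-- def maxIntersections(lines, N):
--     starts = sorted(a for a, b in lines)
--     ends = sorted(b + 1 for a, b in lines)
--     j = 0
--     active = 0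
--     mx = 1
--     for s in starts:
--         while j < len(ends) and ends[j] <= s:
--             active -= 1
--             j += 1
--         active += 1
--         if active > mx:
--             mx = active
--     return mx
-- ===== Notes on version B (the rewrite author's own statement) =====
-- stated objective: alternative
-- what changed: A builds a +1/-1 difference dictionary keyed by endpoints and prefix-sums it over its sorted keys; B instead sorts the start coordinates and the shifted end coordinates (b+1) into two separate arrays and merges them with a pointer and a running active-interval counter, recording the running maximum.
import Mathlib
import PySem

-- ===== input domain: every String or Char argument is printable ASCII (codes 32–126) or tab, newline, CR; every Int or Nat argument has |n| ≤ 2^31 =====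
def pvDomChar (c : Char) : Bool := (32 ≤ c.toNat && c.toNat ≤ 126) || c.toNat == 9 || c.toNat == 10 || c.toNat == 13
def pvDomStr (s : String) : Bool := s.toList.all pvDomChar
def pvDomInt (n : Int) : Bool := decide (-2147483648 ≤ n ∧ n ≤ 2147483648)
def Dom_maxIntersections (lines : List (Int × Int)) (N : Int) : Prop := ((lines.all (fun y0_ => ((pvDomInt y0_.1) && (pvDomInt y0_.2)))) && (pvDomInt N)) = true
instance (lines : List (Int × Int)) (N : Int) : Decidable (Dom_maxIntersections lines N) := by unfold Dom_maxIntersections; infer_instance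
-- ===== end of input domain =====

-- B replaces A's difference-dict + sorted-key prefix-sum sweep by two separately sorted
-- endpoint arrays walked with a merge-style pointer and a running active counter (alternative
-- decomposition, similar cost).


-- ===== PORT A =====
-- q[i[0]] = q.get(i[0],0)+1 ; q[i[1]+1] = q.get(i[1]+1,0)-1, then prefix-sum over sorted(q)
def maxIntersections (lines : List (Int × Int)) (N : Int) : Int :=
  let q : PySem.Dict Int Int := lines.foldl (fun q i =>
      let q1 := q.insert i.1 (q.getD i.1 0 + 1)
      q1.insert (i.2 + 1) (q1.getD (i.2 + 1) 0 - 1)) PySem.Dict.empty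
  let r := (PySem.List.sorted q.keys (fun x => x) false).foldl
      (fun (st : Int × Int) k =>
        let ps := st.1 + q.getD k 0
        (ps, max st.2 ps)) (0, 1)
  r.2

-- ===== PORT B =====
-- the inner 'while j < len(ends) and ends[j] <= s: active -= 1; j += 1' (remaining suffix as a list)
def pvConsume : List Int → Int → Int → List Int × Int
  | [], _, active => ([], active)
  | e :: rest, s, active =>
      if e ≤ s then pvConsume rest s (active - 1) else (e :: rest, active)

def maxIntersections_alt (lines : List (Int × Int)) (N : Int) : Int :=
  let starts := PySem.List.sorted (lines.map (·.1)) (fun x => x) false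
  let ends := PySem.List.sorted (lines.map (fun p => p.2 + 1)) (fun x => x) false
  let r := starts.foldl (fun (st : List Int × Int × Int) s =>
      let p := pvConsume st.1 s st.2.1
      let ac := p.2 + 1
      (p.1, ac, if ac > st.2.2 then ac else st.2.2)) (ends, 0, 1)
  r.2.2

-- ===== PRECONDITION & SPEC =====
def Spec_maxIntersections (lines : List (Int × Int)) (N : Int) (out : Int) : Prop := out = maxIntersections_alt lines N
instance (lines : List (Int × Int)) (N : Int) (out : Int) : Decidable (Spec_maxIntersections lines N out) := by unfold Spec_maxIntersections; infer_instance

-- ===== CLAIM (what is proved, stated in full; the proofs are below) =====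
def Claim_equal_maxIntersections : Prop := ∀ (lines : List (Int × Int)) (N : Int), Dom_maxIntersections lines N → Spec_maxIntersections lines N (maxIntersections lines N)

-- ===== LEMMAS AND PROOFS =====

-- start values, shifted end values (b+1), and counting helpers
def pvS (lines : List (Int × Int)) : List Int := lines.map (·.1)
def pvE (lines : List (Int × Int)) : List Int := lines.map (fun p => p.2 + 1)
def pvCnt (xs : List Int) (x : Int) : Int := (xs.countP (fun y => decide (y ≤ x)) : Int)
def pvG (lines : List (Int × Int)) (x : Int) : Int := pvCnt (pvS lines) x - pvCnt (pvE lines) x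
-- the common value: max(1, max over start coordinates of the net coverage there)
def pvM (lines : List (Int × Int)) : Int :=
  (pvS lines).foldl (fun m s => max m (pvG lines s)) 1

-- A's prefix-sum loop, as a structural recursion
def pvARef (v : Int → Int) : List Int → Int → Int → Int
  | [], _, mx => mx
  | k :: t, ps, mx => pvARef v t (ps + v k) (max mx (ps + v k))

-- B's loop with the end-consumption resolved into absolute counts
def pvSpec (c : Int → Int) : List Int → Int → Int → Int
  | [], _, mx => mx
  | s :: t, k, mx => pvSpec c t (k + 1) (max mx (k + 1 - c s))

-- one step of B's loop (exactly the port's fold body)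
def pvBStep (st : List Int × Int × Int) (s : Int) : List Int × Int × Int :=
  let p := pvConsume st.1 s st.2.1
  let ac := p.2 + 1
  (p.1, ac, if ac > st.2.2 then ac else st.2.2)

-- ---- A side ----
-- one step of A's dict-building loop (exactly the port's fold body, zeta-reduced)
def pvQStep (q : PySem.Dict Int Int) (i : Int × Int) : PySem.Dict Int Int :=
  (q.insert i.1 (q.getD i.1 0 + 1)).insert (i.2 + 1)
    ((q.insert i.1 (q.getD i.1 0 + 1)).getD (i.2 + 1) 0 - 1)

lemma qval (lines : List (Int × Int)) (d : PySem.Dict Int Int) (k : Int) :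
    (lines.foldl pvQStep d).getD k 0
    = d.getD k 0 + ((lines.map (·.1)).count k : Int) - ((lines.map (fun p => p.2 + 1)).count k : Int) := by
  induction lines generalizing d with
  | nil => simp
  | cons p rest ih =>
    obtain ⟨a, b⟩ := p
    simp only [List.foldl_cons]
    rw [ih]
    simp only [pvQStep, PySem.Dict.getD_insert, List.map_cons, List.count_cons, beq_iff_eq]
    split_ifs <;> subst_vars <;> push_cast <;> omega

lemma qkeys_mem (lines : List (Int × Int)) (d : PySem.Dict Int Int) (k : Int) :
    (k ∈ (lines.foldl pvQStep d).keys)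
    ↔ (k ∈ d.keys ∨ k ∈ lines.map (·.1) ∨ k ∈ lines.map (fun p => p.2 + 1)) := by
  induction lines generalizing d with
  | nil => simp
  | cons p rest ih =>
    obtain ⟨a, b⟩ := p
    simp only [List.foldl_cons]
    rw [ih]
    simp only [pvQStep, PySem.Dict.mem_keys_insert, List.map_cons, List.mem_cons]
    tauto

lemma qkeys_nodup (lines : List (Int × Int)) (d : PySem.Dict Int Int) (h : d.keys.Nodup) :
    (lines.foldl pvQStep d).keys.Nodup := by
  induction lines generalizing d with
  | nil => simpa using h
  | cons p rest ih =>
    simp only [List.foldl_cons, pvQStep]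
    exact ih _ (PySem.Dict.nodup_keys_insert _ _ _ (PySem.Dict.nodup_keys_insert _ _ _ h))

lemma sum_count_filter (xs : List Int) (ks : List Int) (hnd : ks.Nodup)
    (hsub : ∀ y ∈ xs, y ∈ ks) (x : Int) :
    ((ks.filter (fun k' => decide (k' ≤ x))).map (fun k' => (xs.count k' : Int))).sum
      = (xs.countP (fun y => decide (y ≤ x)) : Int) := by
  induction xs with
  | nil => simp
  | cons y xs' ih =>
    have hfl : (ks.filter (fun k' => decide (k' ≤ x))).Nodup := hnd.filter _
    have hy : y ∈ ks := hsub y (List.mem_cons_self ..)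
    have hsub' : ∀ z ∈ xs', z ∈ ks := fun z hz => hsub z (List.mem_cons_of_mem _ hz)
    have hmapeq : (fun k' => (((y :: xs').count k' : Nat) : Int))
        = fun k' => ((xs'.count k' : Int) + if (k' == y : Bool) then (1 : Int) else 0) := by
      funext k'
      rw [List.count_cons]
      by_cases h : k' = y
      · simp [h]
      · simp [h]
        omega
    rw [hmapeq, PySem.List.sum_map_add_int, PySem.List.sum_map_ite_one_zero,
      ih hsub', List.countP_cons]
    have hcnt : (ks.filter (fun k' => decide (k' ≤ x))).countP (fun k' => k' == y)
        = if decide (y ≤ x) then 1 else 0 := by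
      have hcc : (ks.filter (fun k' => decide (k' ≤ x))).countP (fun k' => k' == y)
          = (ks.filter (fun k' => decide (k' ≤ x))).count y := rfl
      rw [hcc]
      by_cases hyx : y ≤ x
      · rw [List.count_eq_one_of_mem hfl (List.mem_filter.mpr ⟨hy, by simpa using hyx⟩),
          if_pos (by simpa using hyx)]
      · rw [List.count_eq_zero.mpr (fun hmem => hyx (by simpa using (List.mem_filter.mp hmem).2)),
          if_neg (by simpa using hyx)]
    rw [hcnt]
    split_ifs <;> push_cast <;> omega

lemma afold_eq_pvARef (ks : List Int) (v : Int → Int) (ps mx : Int) :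
    (ks.foldl (fun (st : Int × Int) k =>
        let p := st.1 + v k
        (p, max st.2 p)) (ps, mx)).2 = pvARef v ks ps mx := by
  induction ks generalizing ps mx with
  | nil => simp [pvARef]
  | cons k t ih => simp only [List.foldl_cons, pvARef]; exact ih _ _

lemma pvARef_le (ks : List Int) (v : Int → Int) (ps mx b : Int)
    (hks : ks.Pairwise (· < ·)) (hmx : mx ≤ b)
    (h : ∀ x ∈ ks, ps + ((ks.filter (fun k' => decide (k' ≤ x))).map v).sum ≤ b) :
    pvARef v ks ps mx ≤ b := by
  induction ks generalizing ps mx with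
  | nil => simpa [pvARef] using hmx
  | cons k t ih =>
    rcases List.pairwise_cons.mp hks with ⟨hall, ht⟩
    have hfk : (k :: t).filter (fun k' => decide (k' ≤ k)) = [k] := by
      simp only [List.filter_cons, decide_eq_true_eq, le_refl, if_pos]
      rw [List.filter_eq_nil_iff.mpr (fun x hx => by have := hall x hx; simp; omega)]
    have hhead : ps + v k ≤ b := by
      have := h k (List.mem_cons_self ..)
      rw [hfk] at this; simpa using this
    refine ih _ _ ht (max_le hmx hhead) (fun x hx => ?_)
    have hkx := hall x hx
    have := h x (List.mem_cons_of_mem _ hx)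
    have hfx : (k :: t).filter (fun k' => decide (k' ≤ x)) = k :: t.filter (fun k' => decide (k' ≤ x)) := by
      simp only [List.filter_cons]
      rw [if_pos (by simp; omega)]
    rw [hfx] at this
    simp only [List.map_cons, List.sum_cons] at this
    omega

lemma pvARef_ge_mx (ks : List Int) (v : Int → Int) (ps mx : Int) :
    mx ≤ pvARef v ks ps mx := by
  induction ks generalizing ps mx with
  | nil => simp [pvARef]
  | cons k t ih => exact le_trans (le_max_left _ _) (ih _ _)

lemma pvARef_ge_elem (ks : List Int) (v : Int → Int) (ps mx : Int)
    (hks : ks.Pairwise (· < ·)) :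
    ∀ x ∈ ks, ps + ((ks.filter (fun k' => decide (k' ≤ x))).map v).sum ≤ pvARef v ks ps mx := by
  induction ks generalizing ps mx with
  | nil => simp
  | cons k t ih =>
    rcases List.pairwise_cons.mp hks with ⟨hall, ht⟩
    intro x hx
    rcases List.mem_cons.mp hx with hxk | hxt
    · subst hxk
      have hfk : (x :: t).filter (fun k' => decide (k' ≤ x)) = [x] := by
        simp only [List.filter_cons, decide_eq_true_eq, le_refl, if_pos]
        rw [List.filter_eq_nil_iff.mpr (fun y hy => by have := hall y hy; simp; omega)]
      rw [hfk]
      simp only [List.map_cons, List.map_nil, List.sum_cons, List.sum_nil, add_zero, pvARef]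
      exact le_trans (le_max_right _ _) (pvARef_ge_mx t v _ _)
    · have hfx : (k :: t).filter (fun k' => decide (k' ≤ x)) = k :: t.filter (fun k' => decide (k' ≤ x)) := by
        simp only [List.filter_cons]
        rw [if_pos (by have := hall x hxt; simp; omega)]
      rw [hfx]
      simp only [List.map_cons, List.sum_cons, pvARef]
      have := ih (ps + v k) (max mx (ps + v k)) ht x hxt
      omega

lemma pvM_bounds (lines : List (Int × Int)) :
    1 ≤ pvM lines ∧ ∀ s ∈ pvS lines, pvG lines s ≤ pvM lines := by
  have := PySem.List.le_foldl_max_int (pvS lines) (pvG lines) 1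
  exact ⟨this.1, this.2⟩

lemma pvM_le (lines : List (Int × Int)) (b : Int)
    (h1 : 1 ≤ b) (h : ∀ s ∈ pvS lines, pvG lines s ≤ b) : pvM lines ≤ b := by
  unfold pvM
  have gen : ∀ (xs : List Int) (a : Int), a ≤ b → (∀ x ∈ xs, pvG lines x ≤ b) →
      xs.foldl (fun m s => max m (pvG lines s)) a ≤ b := by
    intro xs
    induction xs with
    | nil => intro a ha _; simpa using ha
    | cons x t ih =>
      intro a ha hx
      simp only [List.foldl_cons]
      exact ih _ (max_le ha (hx x (List.mem_cons_self ..)))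
        (fun y hy => hx y (List.mem_cons_of_mem _ hy))
  exact gen _ 1 h1 h

lemma pvG_le_pvM (lines : List (Int × Int)) (k : Int)
    (hk : k ∈ pvS lines ∨ k ∈ pvE lines) : pvG lines k ≤ pvM lines := by
  rcases hk with hkS | hkE
  · exact (pvM_bounds lines).2 k hkS
  by_cases hex : ∃ s ∈ pvS lines, s ≤ k
  · obtain ⟨s0, hs0S, hs0k⟩ := hex
    rcases hm : PySem.List.max? ((pvS lines).filter (fun y => decide (y ≤ k))) (fun x => x) with _ | m
    · exact absurd ((PySem.List.max?_eq_none_iff _ _).mp hm)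
        (by simp [List.filter_eq_nil_iff]; exact ⟨s0, hs0S, hs0k⟩)
    have hmmem := PySem.List.max?_mem hm
    have hmS : m ∈ pvS lines := (List.mem_filter.mp hmmem).1
    have hmk : m ≤ k := by simpa using (List.mem_filter.mp hmmem).2
    have hmax := PySem.List.max?_isMax hm
    have hSeq : pvCnt (pvS lines) k = pvCnt (pvS lines) m := by
      unfold pvCnt
      congr 1
      exact List.countP_congr (fun y hy => by
        simp only [decide_eq_true_eq]
        constructor
        · intro hyk; exact hmax y (List.mem_filter.mpr ⟨hy, by simpa using hyk⟩)
        · intro hym; omega)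
    have hEle : pvCnt (pvE lines) m ≤ pvCnt (pvE lines) k := by
      unfold pvCnt
      exact_mod_cast List.countP_mono_left (fun y _ hy => by
        simp only [decide_eq_true_eq] at hy ⊢; omega)
    have : pvG lines k ≤ pvG lines m := by unfold pvG; omega
    exact le_trans this ((pvM_bounds lines).2 m hmS)
  · have hS0 : (pvS lines).countP (fun y => decide (y ≤ k)) = 0 :=
      List.countP_eq_zero.mpr (fun y hy => by
        simp only [decide_eq_true_eq]
        exact fun hyk => hex ⟨y, hy, hyk⟩)
    have hE0 : (0 : Int) ≤ ((pvE lines).countP (fun y => decide (y ≤ k)) : Int) := by positivity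
    have h1 := (pvM_bounds lines).1
    unfold pvG pvCnt
    omega

lemma sum_map_sub_int (l : List Int) (f g : Int → Int) :
    (l.map (fun x => f x - g x)).sum = (l.map f).sum - (l.map g).sum := by
  induction l with
  | nil => simp
  | cons a t ih => simp only [List.map_cons, List.sum_cons, ih]; ring

lemma a_eq_pvM (lines : List (Int × Int)) (N : Int) :
    maxIntersections lines N = pvM lines := by
  have hshow : maxIntersections lines N
      = ((PySem.List.sorted (lines.foldl pvQStep PySem.Dict.empty).keys (fun x => x) false).foldl
          (fun (st : Int × Int) k =>
            (st.1 + (lines.foldl pvQStep PySem.Dict.empty).getD k 0,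
             max st.2 (st.1 + (lines.foldl pvQStep PySem.Dict.empty).getD k 0))) (0, 1)).2 := rfl
  rw [hshow, afold_eq_pvARef]
  set Q := lines.foldl pvQStep PySem.Dict.empty with hQ
  have hget : ∀ k, Q.getD k 0 = ((pvS lines).count k : Int) - ((pvE lines).count k : Int) := by
    intro k
    rw [hQ, qval]
    simp [PySem.Dict.getD_empty, pvS, pvE]
  have hnd : Q.keys.Nodup := by
    rw [hQ]; exact qkeys_nodup lines _ PySem.Dict.nodup_keys_empty
  have hmem : ∀ k, k ∈ Q.keys ↔ (k ∈ pvS lines ∨ k ∈ pvE lines) := by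
    intro k
    rw [hQ]
    have := qkeys_mem lines PySem.Dict.empty k
    simpa [pvS, pvE, PySem.Dict.keys_empty] using this
  have hperm := PySem.List.sorted_perm Q.keys (fun x => x) false
  have hpw : (PySem.List.sorted Q.keys (fun x => x) false).Pairwise (· ≤ ·) :=
    PySem.List.sorted_pairwise _ _
  have hknd : (PySem.List.sorted Q.keys (fun x => x) false).Nodup := hperm.nodup_iff.mpr hnd
  have hlt : (PySem.List.sorted Q.keys (fun x => x) false).Pairwise (· < ·) :=
    (List.pairwise_and_iff.mpr ⟨hpw, hknd⟩).imp (fun h => lt_of_le_of_ne h.1 h.2)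
  have hkmem : ∀ x, x ∈ PySem.List.sorted Q.keys (fun x => x) false ↔
      (x ∈ pvS lines ∨ x ∈ pvE lines) := fun x => hperm.mem_iff.trans (hmem x)
  have hsum : ∀ x, (((PySem.List.sorted Q.keys (fun x => x) false).filter
        (fun k' => decide (k' ≤ x))).map (fun k => Q.getD k 0)).sum = pvG lines x := by
    intro x
    rw [show (fun k => Q.getD k 0) = fun k => (((pvS lines).count k : Int)
        - ((pvE lines).count k : Int)) from funext hget]
    rw [sum_map_sub_int, sum_count_filter _ _ hknd (fun y hy => (hkmem y).mpr (Or.inl hy)) x,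
      sum_count_filter _ _ hknd (fun y hy => (hkmem y).mpr (Or.inr hy)) x]
    rfl
  apply le_antisymm
  · apply pvARef_le _ _ _ _ _ hlt (pvM_bounds lines).1
    intro x hx
    rw [hsum x]
    have := pvG_le_pvM lines x ((hkmem x).mp hx)
    omega
  · apply pvM_le
    · exact pvARef_ge_mx _ _ _ _
    · intro s hsS
      have hs : s ∈ PySem.List.sorted Q.keys (fun x => x) false := (hkmem s).mpr (Or.inl hsS)
      have := pvARef_ge_elem _ (fun k => Q.getD k 0) 0 1 hlt s hs
      rw [hsum s] at this
      omega

-- ---- B side ----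
lemma pvConsume_sorted (es : List Int) (s ac : Int) (hes : es.Pairwise (· ≤ ·)) :
    pvConsume es s ac
      = (es.filter (fun e => decide (s < e)), ac - (es.countP (fun e => decide (e ≤ s)) : Int)) := by
  induction es generalizing ac with
  | nil => simp [pvConsume]
  | cons e rest ih =>
    rcases List.pairwise_cons.mp hes with ⟨hall, hrest⟩
    by_cases hle : e ≤ s
    · rw [pvConsume, if_pos hle, ih _ hrest]
      have h1 : decide (s < e) = false := by simp; omega
      have h2 : decide (e ≤ s) = true := by simpa using hle
      simp [h1, h2]
      ring
    · rw [pvConsume, if_neg hle]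
      have h1 : decide (s < e) = true := by simp; omega
      have h2 : rest.filter (fun e => decide (s < e)) = rest :=
        List.filter_eq_self.mpr (fun x hx => by have := hall x hx; simp; omega)
      have h3 : rest.countP (fun e => decide (e ≤ s)) = 0 :=
        List.countP_eq_zero.mpr (fun x hx => by have := hall x hx; simp; omega)
      simp [h1, h2, h3, hle]

lemma pvSpec_congr (ss : List Int) (c1 c2 : Int → Int) (k1 k2 mx : Int)
    (h : ∀ u ∈ ss, k1 - c1 u = k2 - c2 u) :
    pvSpec c1 ss k1 mx = pvSpec c2 ss k2 mx := by
  induction ss generalizing k1 k2 mx with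
  | nil => simp [pvSpec]
  | cons s t ih =>
    have hs := h s (List.mem_cons_self ..)
    have h1 : k1 + 1 - c1 s = k2 + 1 - c2 s := by omega
    simp only [pvSpec, h1]
    exact ih _ _ _ (fun u hu => by have := h u (List.mem_cons_of_mem _ hu); omega)

lemma cnt_filter_gt (es : List Int) (s u : Int) (hsu : s ≤ u) :
    pvCnt (es.filter (fun e => decide (s < e))) u = pvCnt es u - pvCnt es s := by
  unfold pvCnt
  induction es with
  | nil => simp
  | cons e rest ih =>
    by_cases h1 : s < e <;> by_cases h2 : e ≤ u <;> by_cases h3 : e ≤ s <;>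
      simp only [List.filter_cons, List.countP_cons, h1, h2, h3, decide_true, decide_false,
        if_true] <;>
      push_cast <;> omega

lemma bfold_eq_pvSpec (ss : List Int) (es : List Int) (ac mx : Int)
    (hss : ss.Pairwise (· ≤ ·)) (hes : es.Pairwise (· ≤ ·)) :
    (ss.foldl pvBStep (es, ac, mx)).2.2
    = pvSpec (fun x => pvCnt es x) ss ac mx := by
  induction ss generalizing es ac mx with
  | nil => simp [pvSpec]
  | cons s t ih =>
    rcases List.pairwise_cons.mp hss with ⟨hall, ht⟩
    have hes' : (es.filter (fun e => decide (s < e))).Pairwise (· ≤ ·) := hes.filter _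
    have hstep : pvBStep (es, ac, mx) s
        = (es.filter (fun e => decide (s < e)),
           ac - (es.countP (fun e => decide (e ≤ s)) : Int) + 1,
           max mx (ac - (es.countP (fun e => decide (e ≤ s)) : Int) + 1)) := by
      simp only [pvBStep, pvConsume_sorted es s ac hes]
      have : (if ac - (es.countP (fun e => decide (e ≤ s)) : Int) + 1 > mx
          then ac - (es.countP (fun e => decide (e ≤ s)) : Int) + 1 else mx)
          = max mx (ac - (es.countP (fun e => decide (e ≤ s)) : Int) + 1) := by
        rw [max_def]; split_ifs <;> omega
      rw [this]
    rw [List.foldl_cons, hstep, ih _ _ _ ht hes']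
    have hcong := pvSpec_congr t (fun x => pvCnt (es.filter (fun e => decide (s < e))) x)
      (fun x => pvCnt es x) (ac - es.countP (fun e => decide (e ≤ s)) + 1) (ac + 1)
      (max mx (ac - es.countP (fun e => decide (e ≤ s)) + 1))
      (fun u hu => by
        have := cnt_filter_gt es s u (hall u hu)
        simp only [pvCnt] at this ⊢
        omega)
    rw [hcong]
    have harr : ac - (es.countP (fun e => decide (e ≤ s)) : Int) + 1
        = ac + 1 - (es.countP (fun e => decide (e ≤ s)) : Int) := by ring
    simp only [pvSpec, pvCnt, harr]

lemma pvSpec_le (ss : List Int) (c : Int → Int) (k mx b : Int)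
    (hss : ss.Pairwise (· ≤ ·)) (hmx : mx ≤ b)
    (h : ∀ s ∈ ss, k + (ss.countP (fun y => decide (y ≤ s)) : Int) - c s ≤ b) :
    pvSpec c ss k mx ≤ b := by
  induction ss generalizing k mx with
  | nil => simpa [pvSpec] using hmx
  | cons s t ih =>
    rcases List.pairwise_cons.mp hss with ⟨hall, ht⟩
    have hhead : k + 1 - c s ≤ b := by
      have := h s (List.mem_cons_self ..)
      rw [List.countP_cons] at this
      rw [if_pos (by simp)] at this
      have hnn : (0 : Int) ≤ (t.countP (fun y => decide (y ≤ s)) : Int) := by positivity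
      push_cast at this ⊢
      omega
    refine ih _ _ ht (max_le hmx hhead) (fun u hu => ?_)
    have := h u (List.mem_cons_of_mem _ hu)
    rw [List.countP_cons] at this
    rw [if_pos (by have := hall u hu; simp; omega)] at this
    push_cast at this ⊢
    omega

lemma pvSpec_ge_mx (ss : List Int) (c : Int → Int) (k mx : Int) :
    mx ≤ pvSpec c ss k mx := by
  induction ss generalizing k mx with
  | nil => simp [pvSpec]
  | cons s t ih => exact le_trans (le_max_left _ _) (ih _ _)

lemma pvSpec_ge_elem (ss : List Int) (c : Int → Int) (k mx : Int)
    (hss : ss.Pairwise (· ≤ ·)) :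
    ∀ s ∈ ss, k + (ss.countP (fun y => decide (y ≤ s)) : Int) - c s ≤ pvSpec c ss k mx := by
  induction ss generalizing k mx with
  | nil => simp
  | cons s0 t ih =>
    rcases List.pairwise_cons.mp hss with ⟨hall, ht⟩
    intro s hs
    by_cases hst : s ∈ t
    · have := ih (k + 1) (max mx (k + 1 - c s0)) ht s hst
      rw [List.countP_cons]
      rw [if_pos (by have := hall s hst; simp; omega)]
      push_cast at this ⊢
      simp only [pvSpec]
      omega
    · have hs0 : s = s0 := by rcases List.mem_cons.mp hs with h' | h'; exact h'; exact absurd h' hst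
      subst hs0
      have h0 : t.countP (fun y => decide (y ≤ s)) = 0 :=
        List.countP_eq_zero.mpr (fun u hu => by
          have h1 := hall u hu
          simp only [decide_eq_true_eq]
          intro h2
          exact hst (by rwa [le_antisymm h2 h1] at hu))
      rw [List.countP_cons, h0, if_pos (by simp)]
      simp only [pvSpec]
      push_cast
      have := pvSpec_ge_mx t c (k + 1) (max mx (k + 1 - c s))
      have h2 := le_max_right mx (k + 1 - c s)
      omega

lemma b_eq_pvM (lines : List (Int × Int)) (N : Int) :
    maxIntersections_alt lines N = pvM lines := by
  show ((PySem.List.sorted (lines.map (·.1)) (fun x => x) false).foldl pvBStep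
      (PySem.List.sorted (lines.map (fun p => p.2 + 1)) (fun x => x) false, 0, 1)).2.2 = pvM lines
  have hss := PySem.List.sorted_pairwise (lines.map (·.1)) (fun x => x)
  have hes := PySem.List.sorted_pairwise (lines.map (fun p => p.2 + 1)) (fun x => x)
  have hpermS := PySem.List.sorted_perm (lines.map (·.1)) (fun x => x) false
  have hpermE := PySem.List.sorted_perm (lines.map (fun p => p.2 + 1)) (fun x => x) false
  rw [bfold_eq_pvSpec _ _ _ _ hss hes]
  have hcntS : ∀ x, ((PySem.List.sorted (lines.map (·.1)) (fun x => x) false).countP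
      (fun y => decide (y ≤ x)) : Int) = pvCnt (pvS lines) x := by
    intro x; unfold pvCnt pvS; rw [hpermS.countP_eq]
  have hcntE : ∀ x, pvCnt (PySem.List.sorted (lines.map (fun p => p.2 + 1)) (fun x => x) false) x
      = pvCnt (pvE lines) x := by
    intro x; unfold pvCnt pvE; rw [hpermE.countP_eq]
  have hfun : (fun x => pvCnt (PySem.List.sorted (lines.map (fun p => p.2 + 1)) (fun x => x) false) x)
      = fun x => pvCnt (pvE lines) x := funext hcntE
  rw [hfun]
  apply le_antisymm
  · apply pvSpec_le _ _ _ _ _ hss (pvM_bounds lines).1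
    intro s hs
    rw [hcntS]
    have hsS : s ∈ pvS lines := hpermS.mem_iff.mp hs
    have := (pvM_bounds lines).2 s hsS
    unfold pvG at this
    omega
  · apply pvM_le
    · exact pvSpec_ge_mx _ _ _ _
    · intro s hsS
      have hs : s ∈ PySem.List.sorted (lines.map (·.1)) (fun x => x) false :=
        hpermS.mem_iff.mpr hsS
      have := pvSpec_ge_elem _ (fun x => pvCnt (pvE lines) x) 0 1 hss s hs
      simp only [hcntS] at this
      unfold pvG
      omega

-- ===== VERDICT (by name: the statement is the Claim_ definition above) =====
theorem maxIntersections_spec : Claim_equal_maxIntersections := by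
  intro lines N _
  unfold Spec_maxIntersections
  rw [a_eq_pvM, b_eq_pvM]
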